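-- pv_equiv track=rewrite | github.com/seizethedayunhui/codetree-algorithm | 250521/Carry 피하기 2/escaping-carry-2.py | check_sum_carry
-- ===== SOURCE A (Python) =====
-- def check_carry(nums) :
--
--     num_elem = list()
--
--     while nums > 0 :
--
--         num_elem.append(nums % 10)
--         nums //= 10
--
--     return num_elem
--
-- def check_sum_carry(num1, num2) :
--
--     num1_elem = check_carry(num1)
--     num2_elem = check_carry(num2)
--
--     elem_len = min(len(num1_elem), len(num2_elem))
--
--     for i in range(elem_len) :
--         if (num1_elem[i] + num2_elem[i]) >= 10 :
--             return False
--
--     return True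
-- ===== SOURCE B (Python) =====
-- def check_sum_carry(num1, num2):
--     while num1 > 0 and num2 > 0:
--         if num1 % 10 + num2 % 10 >= 10:
--             return False
--         num1 //= 10
--         num2 //= 10
--     return True
-- ===== Notes on version B (the rewrite author's own statement) =====
-- stated objective: simpler
-- what changed: Replaced the helper that materializes each number's digit list plus a separate index loop over the shorter list with one lockstep while-loop that streams both numbers' least-significant digits and divides both by 10, keeping no lists at all.
import Mathlib
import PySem

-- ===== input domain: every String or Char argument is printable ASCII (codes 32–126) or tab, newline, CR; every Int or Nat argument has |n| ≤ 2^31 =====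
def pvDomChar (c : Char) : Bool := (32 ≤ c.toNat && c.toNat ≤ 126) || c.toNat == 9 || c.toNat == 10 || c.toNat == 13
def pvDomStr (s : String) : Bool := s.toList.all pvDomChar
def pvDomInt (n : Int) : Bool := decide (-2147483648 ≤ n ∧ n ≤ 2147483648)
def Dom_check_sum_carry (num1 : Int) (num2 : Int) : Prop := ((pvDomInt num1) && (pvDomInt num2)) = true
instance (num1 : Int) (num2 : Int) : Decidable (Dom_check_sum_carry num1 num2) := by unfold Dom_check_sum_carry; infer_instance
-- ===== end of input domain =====

-- B replaces A's two materialized digit lists plus index loop by a single lockstep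
-- digit-streaming loop on the two numbers (objective: simpler; same digit test).

-- termination fact for the digit loops (used by both ports via decreasing_by)
theorem pv_fd10_lt (n : Int) (h : 0 < n) :
    (PySem.Int.floordiv n 10).toNat < n.toNat := by
  rw [PySem.Int.floordiv_eq_ediv_of_pos (by norm_num)]
  omega

-- ===== PORT A =====
-- while nums > 0: num_elem.append(nums % 10); nums //= 10
def check_carry (nums : Int) : List Int :=
  if 0 < nums then
    PySem.Int.mod nums 10 :: check_carry (PySem.Int.floordiv nums 10)
  else []
termination_by nums.toNat
decreasing_by exact pv_fd10_lt _ (by assumption)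

-- for i in range(elem_len): if num1_elem[i] + num2_elem[i] >= 10: return False
def loopA (a b : List Int) : List Nat → Bool
  | [] => true
  | i :: is => if a.getD i 0 + b.getD i 0 ≥ 10 then false else loopA a b is

def check_sum_carry (num1 : Int) (num2 : Int) : Bool :=
  let num1_elem := check_carry num1
  let num2_elem := check_carry num2
  let elem_len := min num1_elem.length num2_elem.length
  loopA num1_elem num2_elem (List.range elem_len)

-- ===== PORT B =====
-- while num1 > 0 and num2 > 0: test the two last digits, then divide both by 10
def check_sum_carry_alt (num1 : Int) (num2 : Int) : Bool :=
  if 0 < num1 ∧ 0 < num2 then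
    if PySem.Int.mod num1 10 + PySem.Int.mod num2 10 ≥ 10 then false
    else check_sum_carry_alt (PySem.Int.floordiv num1 10) (PySem.Int.floordiv num2 10)
  else true
termination_by num1.toNat
decreasing_by exact pv_fd10_lt _ (by omega)

-- ===== PRECONDITION & SPEC =====
def Spec_check_sum_carry (num1 : Int) (num2 : Int) (out : Bool) : Prop := out = check_sum_carry_alt num1 num2
instance (num1 : Int) (num2 : Int) (out : Bool) : Decidable (Spec_check_sum_carry num1 num2 out) := by unfold Spec_check_sum_carry; infer_instance

-- ===== CLAIM (what is proved, stated in full; the proofs are below) =====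
def Claim_equal_check_sum_carry : Prop := ∀ (num1 : Int) (num2 : Int), Dom_check_sum_carry num1 num2 → Spec_check_sum_carry num1 num2 (check_sum_carry num1 num2)

-- ===== LEMMAS AND PROOFS =====

theorem check_carry_nonpos {n : Int} (h : ¬ 0 < n) : check_carry n = [] := by
  rw [check_carry]; simp [h]

theorem check_carry_pos {n : Int} (h : 0 < n) :
    check_carry n = PySem.Int.mod n 10 :: check_carry (PySem.Int.floordiv n 10) := by
  rw [check_carry]; simp [h]

theorem loopA_shift (x y : Int) (xs ys : List Int) (is : List Nat) :
    loopA (x :: xs) (y :: ys) (is.map Nat.succ) = loopA xs ys is := by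
  induction is with
  | nil => rfl
  | cons i is ih => simp [loopA, ih]

theorem main_eq (n : Nat) : ∀ (num1 num2 : Int), num1.toNat ≤ n →
    check_sum_carry num1 num2 = check_sum_carry_alt num1 num2 := by
  induction n with
  | zero =>
    intro num1 num2 h
    have h1 : ¬ 0 < num1 := by omega
    rw [check_sum_carry_alt]
    simp [check_sum_carry, check_carry_nonpos h1, loopA, h1]
  | succ n ih =>
    intro num1 num2 h
    rw [check_sum_carry_alt]
    by_cases hb : 0 < num1 ∧ 0 < num2
    · obtain ⟨h1, h2⟩ := hb
      have e1 := check_carry_pos h1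
      have e2 := check_carry_pos h2
      simp only [check_sum_carry, e1, e2, List.length_cons, Nat.succ_min_succ,
        List.range_succ_eq_map, loopA, List.getD_cons_zero, loopA_shift]
      have hrec := ih (PySem.Int.floordiv num1 10) (PySem.Int.floordiv num2 10)
        (by have := pv_fd10_lt num1 h1; omega)
      simp only [check_sum_carry] at hrec
      simp [h1, h2] at hrec ⊢
      simp [hrec]
    · have : check_carry num1 = [] ∨ check_carry num2 = [] := by
        rcases not_and_or.mp hb with h | h
        · exact Or.inl (check_carry_nonpos h)
        · exact Or.inr (check_carry_nonpos h)
      rcases this with e | e <;>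
        simp [check_sum_carry, e, loopA, hb]

-- ===== VERDICT (by name: the statement is the Claim_ definition above) =====
theorem check_sum_carry_spec : Claim_equal_check_sum_carry := by
  intro num1 num2 _
  unfold Spec_check_sum_carry
  exact main_eq num1.toNat num1 num2 le_rfl
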